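-- pv_equiv track=rewrite | github.com/eliterajkumar/fynorra-rag-backend | backend/services/pdf_processor.py | search_in_pdfs
-- ===== SOURCE A (Python) =====
-- from typing import List, Dict
--
-- def chunk_text(text: str, chunk_size: int = 1000) -> List[str]:
--     """Split text into chunks for better processing"""
--     words = text.split()
--     chunks = []
--     current_chunk = []
--     current_size = 0
--
--     for word in words:
--         if current_size + len(word) > chunk_size and current_chunk:
--             chunks.append(" ".join(current_chunk))
--             current_chunk = [word]
--             current_size = len(word)
--         else:
--             current_chunk.append(word)
--             current_size += len(word) + 1
--
--     if current_chunk: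
--         chunks.append(" ".join(current_chunk))
--
--     return chunks
--
-- def search_in_pdfs(query: str, pdf_texts: List[Dict], max_chunks: int = 3) -> List[str]:
--     """Simple keyword-based search in PDF texts"""
--     query_words = query.lower().split()
--     relevant_chunks = []
--
--     for pdf in pdf_texts:
--         text = pdf.get("text", "")
--         chunks = chunk_text(text)
--
--         for chunk in chunks:
--             chunk_lower = chunk.lower()
--             score = sum(1 for word in query_words if word in chunk_lower)
--
--             if score > 0:
--                 relevant_chunks.append({
--                     "text": chunk[:800],  # Limit chunk size
--                     "filename": pdf.get("filename", ""),
--                     "score": score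
--                 })
--
--     # Sort by relevance and return top chunks
--     relevant_chunks.sort(key=lambda x: x["score"], reverse=True)
--     return [f"[{chunk['filename']}] {chunk['text']}" for chunk in relevant_chunks[:max_chunks]]
-- ===== SOURCE B (Python) =====
-- from typing import List, Dict
--
-- def chunk_text(text: str, chunk_size: int = 1000) -> List[str]:
--     """Split text into chunks for better processing"""
--     words = text.split()
--     chunks = []
--     current_chunk = []
--     current_size = 0
--
--     for word in words:
--         if current_size + len(word) > chunk_size and current_chunk:
--             chunks.append(" ".join(current_chunk))
--             current_chunk = [word]
--             current_size = len(word)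
--         else:
--             current_chunk.append(word)
--             current_size += len(word) + 1
--
--     if current_chunk:
--         chunks.append(" ".join(current_chunk))
--
--     return chunks
--
-- def search_in_pdfs(query: str, pdf_texts: List[Dict], max_chunks: int = 3) -> List[str]:
--     """Keyword search: bucket hits by score (bounded by the number of query words),
--     then emit buckets from highest score down -- no comparison sort needed."""
--     query_words = query.lower().split()
--     buckets = {}  # score -> formatted result strings, in encounter order
--
--     for pdf in pdf_texts:
--         filename = pdf.get("filename", "")
--         for chunk in chunk_text(pdf.get("text", "")):
--             chunk_lower = chunk.lower()
--             score = sum(1 for word in query_words if word in chunk_lower)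
--             if score > 0:
--                 buckets[score] = buckets.get(score, []) + [f"[{filename}] {chunk[:800]}"]
--
--     out = []
--     for s in range(len(query_words), 0, -1):
--         out += buckets.get(s, [])
--     return out[:max_chunks]
-- ===== Notes on version B (the rewrite author's own statement) =====
-- stated objective: alternative
-- what changed: Replaces collect-then-stable-sort-by-score with a bucket (counting) selection: qualifying chunks are formatted immediately and appended to a per-score bucket (scores are bounded by the number of query words), then buckets are emitted from highest score down, which reproduces the stable descending order without any comparison sort.
import Mathlib
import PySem

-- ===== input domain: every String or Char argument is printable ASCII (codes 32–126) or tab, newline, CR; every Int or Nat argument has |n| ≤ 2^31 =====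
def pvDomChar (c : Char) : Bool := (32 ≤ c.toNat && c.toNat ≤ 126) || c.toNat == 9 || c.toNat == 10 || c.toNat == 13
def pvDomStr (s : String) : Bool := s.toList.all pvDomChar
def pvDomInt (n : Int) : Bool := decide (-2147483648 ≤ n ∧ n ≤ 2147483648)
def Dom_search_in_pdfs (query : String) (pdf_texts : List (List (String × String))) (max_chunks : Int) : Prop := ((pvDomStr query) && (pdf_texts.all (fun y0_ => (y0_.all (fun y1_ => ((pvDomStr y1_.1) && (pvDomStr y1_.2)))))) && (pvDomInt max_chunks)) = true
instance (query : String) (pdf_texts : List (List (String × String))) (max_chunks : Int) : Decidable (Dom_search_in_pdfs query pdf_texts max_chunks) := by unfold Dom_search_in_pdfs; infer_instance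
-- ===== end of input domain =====

-- B replaces A's collect-then-stable-sort-by-score with per-score buckets emitted from the
-- highest score down (a counting selection over the bounded score range); same results.

-- ===== PORT A =====
-- shared helper: literal port of chunk_text (identical helper in Source A and Source B)
def chunkText (text : String) (chunk_size : Int) : List String :=
  let words := PySem.Str.split₀ text
  let st := words.foldl
    (fun (st : List String × List String × Int) word =>
      let chunks := st.1
      let cur := st.2.1
      let size := st.2.2
      if size + PySem.Str.len word > chunk_size ∧ cur ≠ [] then
        (chunks ++ [PySem.Str.join " " cur], [word], PySem.Str.len word)
      else
        (chunks, cur ++ [word], size + PySem.Str.len word + 1))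
    ([], [], 0)
  if st.2.1 ≠ [] then st.1 ++ [PySem.Str.join " " st.2.1] else st.1

-- shared helper: `sum(1 for word in query_words if word in chunk_lower)` (identical line in Source A and Source B)
def scoreQ (query_words : List String) (chunk_lower : String) : Int :=
  (query_words.map (fun word => if PySem.Str.isIn word chunk_lower then (1 : Int) else 0)).sum

def search_in_pdfs (query : String) (pdf_texts : List (List (String × String))) (max_chunks : Int) : List String :=
  let query_words := PySem.Str.split₀ (PySem.Str.lower query)
  let relevant_chunks := pdf_texts.foldl
    (fun acc pdf =>
      let text := (PySem.Dict.mk pdf).getD "text" ""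
      let chunks := chunkText text 1000
      chunks.foldl
        (fun acc2 chunk =>
          let score := scoreQ query_words (PySem.Str.lower chunk)
          if 0 < score then
            acc2 ++ [(PySem.Str.slice chunk none (some 800), (PySem.Dict.mk pdf).getD "filename" "", score)]
          else acc2)
        acc)
    []
  let sortedRel := PySem.List.sorted relevant_chunks (fun x => x.2.2) true
  (PySem.List.slice sortedRel none (some max_chunks)).map
    (fun chunk => "[" ++ chunk.2.1 ++ "] " ++ chunk.1)

-- ===== PORT B =====
def search_in_pdfs_alt (query : String) (pdf_texts : List (List (String × String))) (max_chunks : Int) : List String :=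
  let query_words := PySem.Str.split₀ (PySem.Str.lower query)
  let buckets := pdf_texts.foldl
    (fun (b : PySem.Dict Int (List String)) pdf =>
      let filename := (PySem.Dict.mk pdf).getD "filename" ""
      (chunkText ((PySem.Dict.mk pdf).getD "text" "") 1000).foldl
        (fun b2 chunk =>
          let score := scoreQ query_words (PySem.Str.lower chunk)
          if 0 < score then
            b2.insert score (b2.getD score [] ++ ["[" ++ filename ++ "] " ++ PySem.Str.slice chunk none (some 800)])
          else b2)
        b)
    (PySem.Dict.mk [])
  let out := (PySem.List.pyRange (query_words.length : Int) 0 (-1)).foldl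
    (fun out s => out ++ buckets.getD s []) []
  PySem.List.slice out none (some max_chunks)

-- ===== PRECONDITION & SPEC =====
def Spec_search_in_pdfs (query : String) (pdf_texts : List (List (String × String))) (max_chunks : Int) (out : List String) : Prop := out = search_in_pdfs_alt query pdf_texts max_chunks
instance (query : String) (pdf_texts : List (List (String × String))) (max_chunks : Int) (out : List String) : Decidable (Spec_search_in_pdfs query pdf_texts max_chunks out) := by unfold Spec_search_in_pdfs; infer_instance

-- ===== CLAIM (what is proved, stated in full; the proofs are below) =====
def Claim_equal_search_in_pdfs : Prop := ∀ (query : String) (pdf_texts : List (List (String × String))) (max_chunks : Int), Dom_search_in_pdfs query pdf_texts max_chunks → Spec_search_in_pdfs query pdf_texts max_chunks (search_in_pdfs query pdf_texts max_chunks)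

-- ===== LEMMAS AND PROOFS =====

-- the abstract "relevant_chunks" list (text[:800], filename, score) both ports produce
def relOf (qws : List String) (pts : List (List (String × String))) : List (String × String × Int) :=
  pts.flatMap (fun pdf =>
    ((chunkText ((PySem.Dict.mk pdf).getD "text" "") 1000).filter
        (fun c => 0 < scoreQ qws (PySem.Str.lower c))).map
      (fun c => (PySem.Str.slice c none (some 800), (PySem.Dict.mk pdf).getD "filename" "", scoreQ qws (PySem.Str.lower c))))

def fmtR (t : String × String × Int) : String := "[" ++ t.2.1 ++ "] " ++ t.1

-- the descending score list [k, k-1, …, 1]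
def desc : Nat → List Int
  | 0 => []
  | n + 1 => ((n : Int) + 1) :: desc n

lemma mem_desc {k : Nat} {s : Int} (h : s ∈ desc k) : 1 ≤ s ∧ s ≤ (k : Int) := by
  induction k with
  | zero => simp [desc] at h
  | succ n ih =>
    simp only [desc, List.mem_cons] at h
    rcases h with h | h
    · subst h; push_cast; omega
    · have := ih h; push_cast; omega

lemma map_range_desc (k : Nat) : (List.range k).map (fun i : Nat => (k : Int) - (i : Int)) = desc k := by
  induction k with
  | zero => simp [desc]
  | succ n ih =>
    rw [List.range_succ_eq_map]
    simp only [List.map_cons, List.map_map, desc, Function.comp_def]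
    congr 1
    exact (List.map_congr_left fun x hx => by push_cast; ring).trans ih

lemma pyRange_desc (k : Nat) : PySem.List.pyRange (k : Int) 0 (-1) = desc k := by
  rw [← map_range_desc]
  simp only [PySem.List.pyRange]
  norm_num
  split_ifs with hpos
  · exact List.map_congr_left (fun i _ => by ring)
  · have hk : k = 0 := by omega
    subst hk; simp

lemma insertBy_append_left {α : Type} (before : α → α → Bool) (x : α) (P Q : List α)
    (h : ∀ p ∈ P, before x p = false) :
    PySem.List.insertBy before x (P ++ Q) = P ++ PySem.List.insertBy before x Q := by
  induction P with
  | nil => simp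
  | cons p P ih =>
    rw [List.cons_append, PySem.List.insertBy, h p (by simp)]
    simp only [Bool.false_eq_true, if_false, List.cons_append, List.cons.injEq, true_and]
    exact ih (fun q hq => h q (by simp [hq]))

lemma insertBy_all_true {α : Type} (before : α → α → Bool) (x : α) (Q : List α)
    (h : ∀ q ∈ Q, before x q = true) :
    PySem.List.insertBy before x Q = x :: Q := by
  cases Q with
  | nil => rfl
  | cons q Q => rw [PySem.List.insertBy, h q (by simp)]; simp

lemma key_mem_flat {α : Type} (key : α → Int) (k : Nat) (xs : List α) (y : α)
    (hy : y ∈ (desc k).flatMap (fun s => xs.filter (fun z => key z = s))) :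
    1 ≤ key y ∧ key y ≤ (k : Int) := by
  simp only [List.mem_flatMap, List.mem_filter, decide_eq_true_eq] at hy
  obtain ⟨s, hs, _, hkey⟩ := hy
  have := mem_desc hs
  omega

lemma ins_buckets {α : Type} (key : α → Int) (x : α) (k : Nat) (xs : List α)
    (hx1 : 1 ≤ key x) (hxk : key x ≤ (k : Int)) :
    PySem.List.insertBy (fun a b => decide (key b < key a)) x
      ((desc k).flatMap (fun s => xs.filter (fun y => key y = s)))
    = (desc k).flatMap (fun s => (xs ++ [x]).filter (fun y => key y = s)) := by
  induction k with
  | zero => exact absurd (hx1.trans hxk) (by norm_num)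
  | succ n ih =>
    simp only [desc, List.flatMap_cons]
    by_cases hx : key x = (n : Int) + 1
    · -- x joins the top bucket
      rw [insertBy_append_left _ _ _ _
          (fun p hp => by
            simp only [List.mem_filter, decide_eq_true_eq] at hp
            simp [hp.2, hx])]
      rw [insertBy_all_true _ _ _
          (fun q hq => by
            have := key_mem_flat key n xs q hq
            simp only [decide_eq_true_eq]
            omega)]
      rw [List.filter_append]
      have hxf : List.filter (fun y => decide (key y = (n : Int) + 1)) [x] = [x] := by
        simp [hx]
      rw [hxf]
      rw [List.append_assoc]
      congr 1
      symm
      rw [List.singleton_append]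
      congr 1
      refine List.flatMap_congr fun s hs => ?_
      have hsb := mem_desc hs
      have hne : ¬ (key x = s) := by omega
      simp [List.filter_append, hne]
    · -- x belongs to a lower bucket
      have hxn : key x ≤ (n : Int) := by
        have : key x ≤ (n : Int) + 1 := by push_cast at hxk; omega
        omega
      rw [insertBy_append_left _ _ _ _
          (fun p hp => by
            simp only [List.mem_filter, decide_eq_true_eq] at hp
            simp only [decide_eq_false_iff_not]
            omega)]
      rw [ih hxn]
      congr 1
      rw [List.filter_append]
      simp [hx]

-- Python's stable reverse sort by a score in [1, k] is exactly the descending bucket concatenation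
lemma sorted_desc {α : Type} (key : α → Int) (k : Nat) (xs : List α)
    (h : ∀ y ∈ xs, 1 ≤ key y ∧ key y ≤ (k : Int)) :
    PySem.List.sorted xs key true
      = (desc k).flatMap (fun s => xs.filter (fun y => key y = s)) := by
  induction xs using List.reverseRecOn with
  | nil => simp [PySem.List.sorted]
  | append_singleton xs x ih =>
    have hx := h x (by simp)
    rw [PySem.List.sorted_rev_eq_foldl_insertBy, List.foldl_append,
        ← PySem.List.sorted_rev_eq_foldl_insertBy]
    simp only [List.foldl_cons, List.foldl_nil]
    rw [ih (fun y hy => h y (by simp [hy]))]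
    exact ins_buckets key x k xs hx.1 hx.2

-- score bounds: 0 ≤ scoreQ ≤ number of query words
lemma scoreQ_le (qws : List String) (cl : String) : scoreQ qws cl ≤ (qws.length : Int) := by
  unfold scoreQ
  rw [PySem.List.sum_map_ite_one_zero]
  exact_mod_cast List.countP_le_length

lemma rel_bounds (qws : List String) (pts : List (List (String × String))) :
    ∀ t ∈ relOf qws pts, 1 ≤ t.2.2 ∧ t.2.2 ≤ (qws.length : Int) := by
  intro t ht
  simp only [relOf, List.mem_flatMap, List.mem_map, List.mem_filter, decide_eq_true_eq] at ht
  obtain ⟨pdf, _, c, ⟨_, hpos⟩, rfl⟩ := ht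
  exact ⟨by dsimp only; omega, by dsimp only; exact scoreQ_le qws _⟩

-- A's accumulation equals relOf
lemma innerA_eq (qws : List String) (pdf : List (String × String)) (cs : List String)
    (acc : List (String × String × Int)) :
    cs.foldl
      (fun acc2 chunk =>
        if 0 < scoreQ qws (PySem.Str.lower chunk) then
          acc2 ++ [(PySem.Str.slice chunk none (some 800), (PySem.Dict.mk pdf).getD "filename" "", scoreQ qws (PySem.Str.lower chunk))]
        else acc2)
      acc
    = acc ++ ((cs.filter (fun c => 0 < scoreQ qws (PySem.Str.lower c))).map
        (fun c => (PySem.Str.slice c none (some 800), (PySem.Dict.mk pdf).getD "filename" "", scoreQ qws (PySem.Str.lower c)))) := by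
  induction cs generalizing acc with
  | nil => simp
  | cons c cs ih =>
    by_cases hc : 0 < scoreQ qws (PySem.Str.lower c) <;>
      simp [hc, ih, List.append_assoc]

lemma outerA_eq (qws : List String) (pts : List (List (String × String)))
    (acc : List (String × String × Int)) :
    pts.foldl
      (fun acc pdf =>
        (chunkText ((PySem.Dict.mk pdf).getD "text" "") 1000).foldl
          (fun acc2 chunk =>
            if 0 < scoreQ qws (PySem.Str.lower chunk) then
              acc2 ++ [(PySem.Str.slice chunk none (some 800), (PySem.Dict.mk pdf).getD "filename" "", scoreQ qws (PySem.Str.lower chunk))]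
            else acc2)
          acc)
      acc
    = acc ++ relOf qws pts := by
  induction pts generalizing acc with
  | nil => simp [relOf]
  | cons pdf pts ih =>
    rw [List.foldl_cons, innerA_eq, ih]
    simp [relOf, List.append_assoc]

-- slice commutes with map
lemma map_slice {α β : Type} (f : α → β) (xs : List α) (b : Int) :
    PySem.List.slice (xs.map f) none (some b) = (PySem.List.slice xs none (some b)).map f := by
  simp [PySem.List.slice, PySem.List.clampIdx, List.map_take]

-- characterization of port A
lemma A_char (query : String) (pts : List (List (String × String))) (mc : Int) :
    search_in_pdfs query pts mc
      = (PySem.List.slice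
          (PySem.List.sorted (relOf (PySem.Str.split₀ (PySem.Str.lower query)) pts) (fun x => x.2.2) true)
          none (some mc)).map fmtR := by
  show (List.map _ (PySem.List.slice (PySem.List.sorted (List.foldl _ [] pts) _ true) none (some mc))) = _
  rw [outerA_eq]
  rfl

-- B's buckets: bucket s holds the formatted strings of the rel entries with score s, in order
lemma innerB_eq (qws : List String) (fn : String) (cs : List String)
    (d : PySem.Dict Int (List String)) (s : Int) :
    (cs.foldl
      (fun b2 chunk =>
        if 0 < scoreQ qws (PySem.Str.lower chunk) then
          b2.insert (scoreQ qws (PySem.Str.lower chunk))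
            (b2.getD (scoreQ qws (PySem.Str.lower chunk)) [] ++
              ["[" ++ fn ++ "] " ++ PySem.Str.slice chunk none (some 800)])
        else b2)
      d).getD s []
    = d.getD s [] ++ ((cs.filter
        (fun c => decide (0 < scoreQ qws (PySem.Str.lower c)) && decide (scoreQ qws (PySem.Str.lower c) = s))).map
        (fun c => "[" ++ fn ++ "] " ++ PySem.Str.slice c none (some 800))) := by
  induction cs generalizing d with
  | nil => simp
  | cons c cs ih =>
    rw [List.foldl_cons, List.filter_cons]
    by_cases hc : 0 < scoreQ qws (PySem.Str.lower c)
    · rw [if_pos hc, ih]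
      rw [PySem.Dict.getD_insert]
      by_cases hs : scoreQ qws (PySem.Str.lower c) = s
      · have hcond : (decide (0 < scoreQ qws (PySem.Str.lower c)) &&
            decide (scoreQ qws (PySem.Str.lower c) = s)) = true := by
          simp only [Bool.and_eq_true, decide_eq_true_eq]; exact ⟨hc, hs⟩
        rw [hcond, if_pos (hs.symm), hs]
        simp [List.append_assoc]
      · have hcond : (decide (0 < scoreQ qws (PySem.Str.lower c)) &&
            decide (scoreQ qws (PySem.Str.lower c) = s)) = false := by simp [hs]
        rw [hcond, if_neg (fun h => hs h.symm)]
        simp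
    · rw [if_neg hc, ih]
      simp [hc]

lemma perPdf_eq (qws : List String) (pdf : List (String × String)) (s : Int) :
    ((((chunkText ((PySem.Dict.mk pdf).getD "text" "") 1000).filter
          (fun c => 0 < scoreQ qws (PySem.Str.lower c))).map
        (fun c => (PySem.Str.slice c none (some 800), (PySem.Dict.mk pdf).getD "filename" "", scoreQ qws (PySem.Str.lower c)))).filter
        (fun t => t.2.2 = s)).map fmtR
    = ((chunkText ((PySem.Dict.mk pdf).getD "text" "") 1000).filter
        (fun c => decide (0 < scoreQ qws (PySem.Str.lower c)) && decide (scoreQ qws (PySem.Str.lower c) = s))).map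
        (fun c => "[" ++ (PySem.Dict.mk pdf).getD "filename" "" ++ "] " ++ PySem.Str.slice c none (some 800)) := by
  rw [List.filter_map, List.filter_filter, List.map_map]
  exact congrArg₂ List.map (funext fun c => rfl) (List.filter_congr fun c _ => Bool.and_comm _ _)

lemma outerB_eq (qws : List String) (pts : List (List (String × String)))
    (d : PySem.Dict Int (List String)) (s : Int) :
    (pts.foldl
      (fun (b : PySem.Dict Int (List String)) pdf =>
        (chunkText ((PySem.Dict.mk pdf).getD "text" "") 1000).foldl
          (fun b2 chunk =>
            if 0 < scoreQ qws (PySem.Str.lower chunk) then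
              b2.insert (scoreQ qws (PySem.Str.lower chunk))
                (b2.getD (scoreQ qws (PySem.Str.lower chunk)) [] ++
                  ["[" ++ (PySem.Dict.mk pdf).getD "filename" "" ++ "] " ++ PySem.Str.slice chunk none (some 800)])
            else b2)
          b)
      d).getD s []
    = d.getD s [] ++ ((relOf qws pts).filter (fun t => t.2.2 = s)).map fmtR := by
  induction pts generalizing d with
  | nil => simp [relOf]
  | cons pdf pts ih =>
    rw [List.foldl_cons, ih, innerB_eq]
    simp only [relOf, List.flatMap_cons, List.filter_append, List.map_append, ← List.append_assoc]
    congr 1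
    congr 1
    exact (perPdf_eq qws pdf s).symm

-- characterization of port B
set_option maxHeartbeats 1000000 in
lemma B_char (query : String) (pts : List (List (String × String))) (mc : Int) :
    search_in_pdfs_alt query pts mc
      = (PySem.List.slice
          (PySem.List.sorted (relOf (PySem.Str.split₀ (PySem.Str.lower query)) pts) (fun x => x.2.2) true)
          none (some mc)).map fmtR := by
  unfold search_in_pdfs_alt
  simp only [pyRange_desc, PySem.List.foldl_append_eq_flatMap, List.nil_append]
  rw [List.flatMap_congr (fun s _ => outerB_eq (PySem.Str.split₀ (PySem.Str.lower query)) pts (PySem.Dict.mk []) s)]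
  simp only [show ∀ s : Int, (PySem.Dict.mk ([] : List (Int × List String))).getD s [] = [] from fun _ => rfl, List.nil_append]
  rw [← List.map_flatMap]
  rw [map_slice]
  rw [sorted_desc (fun t : String × String × Int => t.2.2)
        (PySem.Str.split₀ (PySem.Str.lower query)).length
        (relOf (PySem.Str.split₀ (PySem.Str.lower query)) pts)
        (rel_bounds (PySem.Str.split₀ (PySem.Str.lower query)) pts)]

-- ===== VERDICT (by name: the statement is the Claim_ definition above) =====
theorem search_in_pdfs_spec : Claim_equal_search_in_pdfs := by
  intro query pts mc _
  unfold Spec_search_in_pdfs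
  rw [A_char, B_char]
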